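-- pv_equiv track=rewrite | github.com/Sankhya-AI/Dhee | scripts/docgen/analyze.py | _role_from_path
-- ===== SOURCE A (Python) =====
-- ROOT_FILES = {"pyproject.toml", "Dockerfile", "docker-compose.yml"}
--
-- def _role_from_path(rel_path: str) -> str:
--     mapping = {
--         "engram/api/": "API service layer",
--         "engram/core/": "core memory kernel",
--         "engram/db/": "database persistence layer",
--         "engram/embeddings/": "embedding provider integration layer",
--         "engram/llms/": "LLM provider abstraction layer",
--         "engram/memory/": "public memory orchestration layer",
--         "engram/retrieval/": "retrieval and ranking layer",
--         "engram/vector_stores/": "vector-store backend layer",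
--         "engram/utils/": "shared utility layer",
--         "engram/integrations/": "external tool integration layer",
--         "plugins/engram-memory/": "agent plugin integration package",
--     }
--     for prefix, role in mapping.items():
--         if rel_path.startswith(prefix):
--             return role
--     if rel_path in ROOT_FILES:
--         return "root runtime/build configuration"
--     return "repository support layer"
-- ===== SOURCE B (Python) =====
-- ROOT_FILES = {"pyproject.toml", "Dockerfile", "docker-compose.yml"}
--
-- _MAPPING = {
--     "engram/api/": "API service layer",
--     "engram/core/": "core memory kernel",
--     "engram/db/": "database persistence layer",
--     "engram/embeddings/": "embedding provider integration layer",
--     "engram/llms/": "LLM provider abstraction layer",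
--     "engram/memory/": "public memory orchestration layer",
--     "engram/retrieval/": "retrieval and ranking layer",
--     "engram/vector_stores/": "vector-store backend layer",
--     "engram/utils/": "shared utility layer",
--     "engram/integrations/": "external tool integration layer",
--     "plugins/engram-memory/": "agent plugin integration package",
-- }
--
-- def _role_from_path(rel_path: str) -> str:
--     parts = rel_path.split("/")
--     if len(parts) >= 3:
--         role = _MAPPING.get(parts[0] + "/" + parts[1] + "/")
--         if role is not None:
--             return role
--     if rel_path in ROOT_FILES:
--         return "root runtime/build configuration"
--     return "repository support layer"
-- ===== Notes on version B (the rewrite author's own statement) =====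
-- stated objective: idiomatic
-- what changed: Instead of scanning all 11 prefixes with startswith, B splits the path into slash-separated segments, reconstructs the two-segment directory key and classifies it with a single direct dict lookup.
import Mathlib
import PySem

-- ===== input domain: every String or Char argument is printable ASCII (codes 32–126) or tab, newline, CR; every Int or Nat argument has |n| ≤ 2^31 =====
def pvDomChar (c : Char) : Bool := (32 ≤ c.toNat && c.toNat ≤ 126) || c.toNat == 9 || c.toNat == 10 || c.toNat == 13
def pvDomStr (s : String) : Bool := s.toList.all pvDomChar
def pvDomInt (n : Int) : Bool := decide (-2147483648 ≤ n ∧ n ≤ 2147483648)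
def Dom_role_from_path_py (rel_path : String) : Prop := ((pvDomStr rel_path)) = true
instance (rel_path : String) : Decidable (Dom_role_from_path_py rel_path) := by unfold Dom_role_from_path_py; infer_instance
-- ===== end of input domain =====

-- B replaces A's linear scan of 11 startswith prefix tests by splitting the path into slash-separated
-- segments and classifying the reconstructed two-segment directory key with one direct dict lookup (idiomatic).

-- ===== PORT A =====
def pvRootFiles : List String := PySem.Set.ofList ["pyproject.toml", "Dockerfile", "docker-compose.yml"]

def pvAMapping : List (String × String) :=
  [("engram/api/", "API service layer"),
   ("engram/core/", "core memory kernel"),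
   ("engram/db/", "database persistence layer"),
   ("engram/embeddings/", "embedding provider integration layer"),
   ("engram/llms/", "LLM provider abstraction layer"),
   ("engram/memory/", "public memory orchestration layer"),
   ("engram/retrieval/", "retrieval and ranking layer"),
   ("engram/vector_stores/", "vector-store backend layer"),
   ("engram/utils/", "shared utility layer"),
   ("engram/integrations/", "external tool integration layer"),
   ("plugins/engram-memory/", "agent plugin integration package")]

-- the `for prefix, role in mapping.items(): if rel_path.startswith(prefix): return role` loop
def pvALoop (rel_path : String) : List (String × String) → Option String
  | [] => none
  | (pre, role) :: rest =>
      if PySem.Str.startswith rel_path pre then some role else pvALoop rel_path rest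

def role_from_path_py (rel_path : String) : String :=
  match pvALoop rel_path pvAMapping with
  | some role => role
  | none =>
      if pvRootFiles.contains rel_path then "root runtime/build configuration"
      else "repository support layer"

-- ===== PORT B =====
def pvBMapping : PySem.Dict String String :=
  ⟨[("engram/api/", "API service layer"),
    ("engram/core/", "core memory kernel"),
    ("engram/db/", "database persistence layer"),
    ("engram/embeddings/", "embedding provider integration layer"),
    ("engram/llms/", "LLM provider abstraction layer"),
    ("engram/memory/", "public memory orchestration layer"),
    ("engram/retrieval/", "retrieval and ranking layer"),
    ("engram/vector_stores/", "vector-store backend layer"),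
    ("engram/utils/", "shared utility layer"),
    ("engram/integrations/", "external tool integration layer"),
    ("plugins/engram-memory/", "agent plugin integration package")]⟩

def role_from_path_py_alt (rel_path : String) : String :=
  -- parts = rel_path.split("/")  (separator non-empty, so the split is total)
  let parts := (PySem.Chars.splitOn rel_path.toList ['/']).map String.ofList
  -- if len(parts) >= 3: role = _MAPPING.get(parts[0] + "/" + parts[1] + "/")
  let role? : Option String :=
    match parts with
    | p0 :: p1 :: _ :: _ => PySem.Dict.get? pvBMapping (p0 ++ "/" ++ p1 ++ "/")
    | _ => none
  match role? with
  | some role => role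
  | none =>
      if pvRootFiles.contains rel_path then "root runtime/build configuration"
      else "repository support layer"

-- ===== PRECONDITION & SPEC =====
def Spec_role_from_path_py (rel_path : String) (out : String) : Prop := out = role_from_path_py_alt rel_path
instance (rel_path : String) (out : String) : Decidable (Spec_role_from_path_py rel_path out) := by unfold Spec_role_from_path_py; infer_instance

-- ===== CLAIM (what is proved, stated in full; the proofs are below) =====
def Claim_equal_role_from_path_py : Prop := ∀ (rel_path : String), Dom_role_from_path_py rel_path → Spec_role_from_path_py rel_path (role_from_path_py rel_path)

-- ===== LEMMAS AND PROOFS =====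

theorem modifyHead_id_eq {α : Type} (l : List α) : List.modifyHead (fun x => x) l = l := by
  cases l <;> simp

theorem intercalate_cc {α : Type} (sep a b : List α) (t : List (List α)) :
    List.intercalate sep (a :: b :: t) = a ++ sep ++ List.intercalate sep (b :: t) := by
  simp [List.intercalate, List.intersperse]

-- A simple structural model of Python's split on the single character '/'
def mySplit : List Char → List (List Char)
  | [] => [[]]
  | c :: r => if c = '/' then [] :: mySplit r else (mySplit r).modifyHead (c :: ·)

theorem mySplit_ne_nil (l : List Char) : mySplit l ≠ [] := by
  induction l with
  | nil => simp [mySplit]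
  | cons c r ih =>
      simp only [mySplit]
      split_ifs
      · simp
      · cases h : mySplit r with
        | nil => exact absurd h ih
        | cons a t => simp [List.modifyHead]

theorem splitOn_go_eq (fuel : ℕ) :
    ∀ (l cur acc : _), l.length < fuel →
      PySem.Chars.splitOn.go ['/'] fuel l cur acc
        = acc.reverse ++ (mySplit l).modifyHead (cur.reverse ++ ·) := by
  induction fuel with
  | zero => intro l cur acc h; omega
  | succ fuel ih =>
      intro l cur acc h
      cases l with
      | nil => simp [PySem.Chars.splitOn.go, mySplit]
      | cons c rest =>
          by_cases hc : c = '/'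
          · subst hc
            rw [show PySem.Chars.splitOn.go ['/'] (fuel+1) ('/'::rest) cur acc
                  = PySem.Chars.splitOn.go ['/'] fuel rest [] (cur.reverse :: acc) from by
                  simp [PySem.Chars.splitOn.go, List.isPrefixOf]]
            rw [ih rest [] (cur.reverse :: acc) (by simpa using Nat.lt_of_succ_lt_succ h)]
            simp [mySplit, modifyHead_id_eq]
          · have step : PySem.Chars.splitOn.go ['/'] (fuel+1) (c::rest) cur acc
                  = PySem.Chars.splitOn.go ['/'] fuel rest (c :: cur) acc := by
              simp only [PySem.Chars.splitOn.go, List.isPrefixOf]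
              split_ifs with hpre
              · have h' : '/' = c := by simpa using hpre
                exact absurd h'.symm hc
              · rfl
            rw [step]
            rw [ih rest (c :: cur) acc (by simpa using Nat.lt_of_succ_lt_succ h)]
            simp only [mySplit, if_neg hc]
            cases hm : mySplit rest with
            | nil => exact absurd hm (mySplit_ne_nil rest)
            | cons a t => simp [List.modifyHead]

theorem splitOn_eq_mySplit (l : List Char) :
    PySem.Chars.splitOn l ['/'] = mySplit l := by
  have := splitOn_go_eq (l.length + 1) l [] [] (by omega)
  simp only [PySem.Chars.splitOn] at *
  rw [this]
  cases hm : mySplit l with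
  | nil => exact absurd hm (mySplit_ne_nil l)
  | cons a t => simp [List.modifyHead]

theorem mySplit_seg (a : List Char) (r : List Char) (ha : '/' ∉ a) :
    mySplit (a ++ '/' :: r) = a :: mySplit r := by
  induction a with
  | nil => simp [mySplit]
  | cons c t ih =>
      have hc : c ≠ '/' := fun h => ha (h ▸ List.mem_cons_self ..)
      have ht : '/' ∉ t := fun h => ha (List.mem_cons_of_mem _ h)
      simp only [List.cons_append, mySplit, if_neg hc, ih ht, List.modifyHead]

theorem join_mySplit (l : List Char) : List.intercalate ['/'] (mySplit l) = l := by
  induction l with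
  | nil => simp [mySplit, List.intercalate]
  | cons c r ih =>
      by_cases hc : c = '/'
      · subst hc
        simp only [mySplit, ite_true]
        cases hm : mySplit r with
        | nil => exact absurd hm (mySplit_ne_nil r)
        | cons a t =>
            rw [hm] at ih
            simp [intercalate_cc] at ih ⊢
            exact ih
      · simp only [mySplit, if_neg hc]
        cases hm : mySplit r with
        | nil => exact absurd hm (mySplit_ne_nil r)
        | cons a t =>
            rw [hm] at ih
            cases t with
            | nil => simpa [List.intercalate] using congrArg (c :: ·) ih
            | cons b u =>
                simp [intercalate_cc] at ih ⊢
                exact ih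

theorem mySplit_noSlash (l : List Char) : ∀ p ∈ mySplit l, '/' ∉ p := by
  induction l with
  | nil => simp [mySplit]
  | cons c r ih =>
      by_cases hc : c = '/'
      · subst hc; simpa [mySplit] using ih
      · simp only [mySplit, if_neg hc]
        cases hm : mySplit r with
        | nil => exact absurd hm (mySplit_ne_nil r)
        | cons a t =>
            rw [hm] at ih
            intro p hp
            simp [List.modifyHead] at hp
            rcases hp with h | h
            · subst h
              intro hmem
              rcases List.mem_cons.mp hmem with h' | h'
              · exact hc h'.symm
              · exact ih a (by simp) h'
            · exact ih p (by simp [h])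

-- '/'-free segment concatenation is injective
theorem seg_inj (p a : List Char) (hp : '/' ∉ p) (ha : '/' ∉ a) :
    ∀ (u v : List Char), p ++ '/' :: u = a ++ '/' :: v → p = a ∧ u = v := by
  induction p generalizing a with
  | nil =>
      intro u v h
      cases a with
      | nil => simpa using h
      | cons c t =>
          simp at h
          exact absurd (h.1 ▸ List.mem_cons_self ..) ha
  | cons c t ih =>
      intro u v h
      cases a with
      | nil =>
          simp at h
          exact absurd (h.1 ▸ List.mem_cons_self ..) hp
      | cons d s =>
          simp at h
          obtain ⟨hcd, hrest⟩ := h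
          have := ih s (fun hm => hp (List.mem_cons_of_mem _ hm)) (fun hm => ha (List.mem_cons_of_mem _ hm)) u v hrest
          exact ⟨by simp [hcd, this.1], this.2⟩

-- the central characterisation: startswith on a two-segment key ↔ the split has that shape
theorem prefix_iff (a b l : List Char) (ha : '/' ∉ a) (hb : '/' ∉ b) :
    (a ++ '/' :: (b ++ ['/'])) <+: l ↔ ∃ rest, mySplit l = a :: b :: rest ∧ rest ≠ [] := by
  constructor
  · rintro ⟨t, ht⟩
    have hl : l = a ++ '/' :: (b ++ '/' :: t) := by simpa [List.append_assoc] using ht.symm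
    rw [hl, mySplit_seg a _ ha, mySplit_seg b _ hb]
    exact ⟨mySplit t, rfl, mySplit_ne_nil t⟩
  · rintro ⟨rest, hm, hne⟩
    have := join_mySplit l
    rw [hm] at this
    cases rest with
    | nil => exact absurd rfl hne
    | cons r rs =>
        rw [intercalate_cc, intercalate_cc] at this
        exact ⟨List.intercalate ['/'] (r :: rs), by
          rw [← this]; simp [List.append_assoc]⟩

-- condition of one A-branch, given the split of l
theorem cond_eq (l p0 p1 : List Char) (rest : List (List Char))
    (hm : mySplit l = p0 :: p1 :: rest) (hrest : rest ≠ [])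
    (a b : List Char) (ha : '/' ∉ a) (hb : '/' ∉ b) :
    (a ++ '/' :: (b ++ ['/'])) <+: l ↔ (p0 = a ∧ p1 = b) := by
  rw [prefix_iff a b l ha hb]
  constructor
  · rintro ⟨rest', hm', _⟩
    rw [hm] at hm'
    exact ⟨by injection hm', by injection hm' with _ h; injection h⟩
  · rintro ⟨h0, h1⟩
    exact ⟨rest, by rw [hm, h0, h1], hrest⟩

-- string-level key equality, given '/'-freeness
theorem key_eq (p0 p1 a b : List Char) (hp0 : '/' ∉ p0) (ha : '/' ∉ a) :
    (String.ofList p0 ++ "/" ++ String.ofList p1 ++ "/"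
       = String.ofList (a ++ '/' :: (b ++ ['/']))) ↔ (p0 = a ∧ p1 = b) := by
  rw [← String.toList_inj]
  simp only [String.toList_append, String.toList_ofList]
  constructor
  · intro h
    have h' : p0 ++ '/' :: (p1 ++ ['/']) = a ++ '/' :: (b ++ ['/']) := by
      simpa [List.append_assoc, show ("/" : String).toList = ['/'] from rfl] using h
    obtain ⟨h0, h1⟩ := seg_inj p0 a hp0 ha _ _ h'
    refine ⟨h0, ?_⟩
    simpa using h1
  · rintro ⟨h0, h1⟩
    simp [h0, h1, List.append_assoc, show ("/" : String).toList = ['/'] from rfl]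


-- A-branch condition = B-branch condition, for one two-segment key, once the split is known
theorem conds_eq (rel_path : String) (p0 p1 : List Char) (rest : List (List Char))
    (hm : mySplit rel_path.toList = p0 :: p1 :: rest) (hrest : rest ≠ [])
    (a b : List Char) (ha : '/' ∉ a) (hb : '/' ∉ b)
    (K : String) (hK : K.toList = a ++ '/' :: (b ++ ['/'])) :
    PySem.Str.startswith rel_path K
      = (K == String.ofList p0 ++ "/" ++ String.ofList p1 ++ "/") := by
  have hp0 : '/' ∉ p0 := mySplit_noSlash rel_path.toList p0 (by rw [hm]; simp)
  rw [Bool.eq_iff_iff]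
  rw [PySem.Str.startswith_eq, PySem.Chars.startswith_iff, hK,
      cond_eq rel_path.toList p0 p1 rest hm hrest a b ha hb]
  rw [beq_iff_eq]
  have hKo : K = String.ofList (a ++ '/' :: (b ++ ['/'])) := by
    rw [← String.ofList_toList (s := K), hK]
  rw [hKo]
  exact ⟨fun h => ((key_eq p0 p1 a b hp0 ha).mpr h).symm,
         fun h => (key_eq p0 p1 a b hp0 ha).mp h.symm⟩

-- in the short case no two-segment prefix can match
theorem startswith_false_short (rel_path : String) (hshort : (mySplit rel_path.toList).length < 3)
    (a b : List Char) (K : String) (ha : '/' ∉ a) (hb : '/' ∉ b)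
    (hK : K.toList = a ++ '/' :: (b ++ ['/'])) :
    PySem.Str.startswith rel_path K = false := by
  rw [PySem.Str.startswith_eq]
  rw [Bool.eq_false_iff, Ne, PySem.Chars.startswith_iff, hK,
      prefix_iff a b rel_path.toList ha hb]
  rintro ⟨rest, hm, hne⟩
  rw [hm] at hshort
  cases rest with
  | nil => exact hne rfl
  | cons x xs => simp at hshort; omega

theorem short_case (rel_path : String) (hshort : (mySplit rel_path.toList).length < 3) :
    role_from_path_py rel_path = role_from_path_py_alt rel_path := by
  have hfalse := startswith_false_short rel_path hshort
  rw [role_from_path_py, role_from_path_py_alt]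
  simp only [splitOn_eq_mySplit]
  simp only [pvAMapping, pvALoop]
  rw [hfalse "engram".toList "api".toList "engram/api/" (by decide) (by decide) (by decide)]
  rw [hfalse "engram".toList "core".toList "engram/core/" (by decide) (by decide) (by decide)]
  rw [hfalse "engram".toList "db".toList "engram/db/" (by decide) (by decide) (by decide)]
  rw [hfalse "engram".toList "embeddings".toList "engram/embeddings/" (by decide) (by decide) (by decide)]
  rw [hfalse "engram".toList "llms".toList "engram/llms/" (by decide) (by decide) (by decide)]
  rw [hfalse "engram".toList "memory".toList "engram/memory/" (by decide) (by decide) (by decide)]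
  rw [hfalse "engram".toList "retrieval".toList "engram/retrieval/" (by decide) (by decide) (by decide)]
  rw [hfalse "engram".toList "vector_stores".toList "engram/vector_stores/" (by decide) (by decide) (by decide)]
  rw [hfalse "engram".toList "utils".toList "engram/utils/" (by decide) (by decide) (by decide)]
  rw [hfalse "engram".toList "integrations".toList "engram/integrations/" (by decide) (by decide) (by decide)]
  rw [hfalse "plugins".toList "engram-memory".toList "plugins/engram-memory/" (by decide) (by decide) (by decide)]
  simp only [Bool.false_eq_true, if_false]
  rcases hm : mySplit rel_path.toList with _ | ⟨p0, _ | ⟨p1, _ | ⟨r, rs⟩⟩⟩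
  · exact absurd hm (mySplit_ne_nil _)
  · rfl
  · rfl
  · rw [hm] at hshort; simp only [List.length_cons] at hshort; omega

 

theorem long_case (rel_path : String) (p0 p1 r : List Char) (rs : List (List Char))
    (hm : mySplit rel_path.toList = p0 :: p1 :: r :: rs) :
    role_from_path_py rel_path = role_from_path_py_alt rel_path := by
  rw [role_from_path_py, role_from_path_py_alt]
  simp only [splitOn_eq_mySplit, hm, List.map]
  simp only [pvAMapping, pvALoop]
  rw [conds_eq rel_path p0 p1 (r :: rs) hm (by simp) "engram".toList "api".toList (by decide) (by decide) "engram/api/" (by decide)]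
  rw [conds_eq rel_path p0 p1 (r :: rs) hm (by simp) "engram".toList "core".toList (by decide) (by decide) "engram/core/" (by decide)]
  rw [conds_eq rel_path p0 p1 (r :: rs) hm (by simp) "engram".toList "db".toList (by decide) (by decide) "engram/db/" (by decide)]
  rw [conds_eq rel_path p0 p1 (r :: rs) hm (by simp) "engram".toList "embeddings".toList (by decide) (by decide) "engram/embeddings/" (by decide)]
  rw [conds_eq rel_path p0 p1 (r :: rs) hm (by simp) "engram".toList "llms".toList (by decide) (by decide) "engram/llms/" (by decide)]
  rw [conds_eq rel_path p0 p1 (r :: rs) hm (by simp) "engram".toList "memory".toList (by decide) (by decide) "engram/memory/" (by decide)]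
  rw [conds_eq rel_path p0 p1 (r :: rs) hm (by simp) "engram".toList "retrieval".toList (by decide) (by decide) "engram/retrieval/" (by decide)]
  rw [conds_eq rel_path p0 p1 (r :: rs) hm (by simp) "engram".toList "vector_stores".toList (by decide) (by decide) "engram/vector_stores/" (by decide)]
  rw [conds_eq rel_path p0 p1 (r :: rs) hm (by simp) "engram".toList "utils".toList (by decide) (by decide) "engram/utils/" (by decide)]
  rw [conds_eq rel_path p0 p1 (r :: rs) hm (by simp) "engram".toList "integrations".toList (by decide) (by decide) "engram/integrations/" (by decide)]
  rw [conds_eq rel_path p0 p1 (r :: rs) hm (by simp) "plugins".toList "engram-memory".toList (by decide) (by decide) "plugins/engram-memory/" (by decide)]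
  simp only [pvBMapping, PySem.Dict.get?, List.find?_cons, List.find?_nil]
  by_cases h1 : ("engram/api/" == String.ofList p0 ++ "/" ++ String.ofList p1 ++ "/") = true
  · simp [h1]
  simp only [Bool.not_eq_true] at h1
  simp only [h1, Bool.false_eq_true, if_false]
  by_cases h2 : ("engram/core/" == String.ofList p0 ++ "/" ++ String.ofList p1 ++ "/") = true
  · simp [h2]
  simp only [Bool.not_eq_true] at h2
  simp only [h2, Bool.false_eq_true, if_false]
  by_cases h3 : ("engram/db/" == String.ofList p0 ++ "/" ++ String.ofList p1 ++ "/") = true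
  · simp [h3]
  simp only [Bool.not_eq_true] at h3
  simp only [h3, Bool.false_eq_true, if_false]
  by_cases h4 : ("engram/embeddings/" == String.ofList p0 ++ "/" ++ String.ofList p1 ++ "/") = true
  · simp [h4]
  simp only [Bool.not_eq_true] at h4
  simp only [h4, Bool.false_eq_true, if_false]
  by_cases h5 : ("engram/llms/" == String.ofList p0 ++ "/" ++ String.ofList p1 ++ "/") = true
  · simp [h5]
  simp only [Bool.not_eq_true] at h5
  simp only [h5, Bool.false_eq_true, if_false]
  by_cases h6 : ("engram/memory/" == String.ofList p0 ++ "/" ++ String.ofList p1 ++ "/") = true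
  · simp [h6]
  simp only [Bool.not_eq_true] at h6
  simp only [h6, Bool.false_eq_true, if_false]
  by_cases h7 : ("engram/retrieval/" == String.ofList p0 ++ "/" ++ String.ofList p1 ++ "/") = true
  · simp [h7]
  simp only [Bool.not_eq_true] at h7
  simp only [h7, Bool.false_eq_true, if_false]
  by_cases h8 : ("engram/vector_stores/" == String.ofList p0 ++ "/" ++ String.ofList p1 ++ "/") = true
  · simp [h8]
  simp only [Bool.not_eq_true] at h8
  simp only [h8, Bool.false_eq_true, if_false]
  by_cases h9 : ("engram/utils/" == String.ofList p0 ++ "/" ++ String.ofList p1 ++ "/") = true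
  · simp [h9]
  simp only [Bool.not_eq_true] at h9
  simp only [h9, Bool.false_eq_true, if_false]
  by_cases h10 : ("engram/integrations/" == String.ofList p0 ++ "/" ++ String.ofList p1 ++ "/") = true
  · simp [h10]
  simp only [Bool.not_eq_true] at h10
  simp only [h10, Bool.false_eq_true, if_false]
  by_cases h11 : ("plugins/engram-memory/" == String.ofList p0 ++ "/" ++ String.ofList p1 ++ "/") = true
  · simp [h11]
  simp only [Bool.not_eq_true] at h11
  simp only [h11, Bool.false_eq_true, if_false]
  rfl

-- ===== VERDICT (by name: the statement is the Claim_ definition above) =====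
theorem role_from_path_py_spec : Claim_equal_role_from_path_py := by
  intro rel_path _
  unfold Spec_role_from_path_py
  rcases hm : mySplit rel_path.toList with _ | ⟨p0, _ | ⟨p1, _ | ⟨r, rs⟩⟩⟩
  · exact absurd hm (mySplit_ne_nil _)
  · exact short_case rel_path (by rw [hm]; simp)
  · exact short_case rel_path (by rw [hm]; simp)
  · exact long_case rel_path p0 p1 r rs hm
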